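-- pv_equiv track=rewrite | github.com/TOIFLMSC/tg_messages_parser | app/links.py | match_link_patterns
-- ===== SOURCE A (Python) =====
-- from typing import Iterable, List, Optional, Sequence
--
-- def match_link_patterns(links: Iterable[str], patterns: Iterable[str]) -> List[str]:
--     """Match configured patterns as case-insensitive substrings of URLs."""
--     matched: List[str] = []
--     patterns_normalized = [p.lower() for p in patterns if p]
--     for link in links:
--         link_lower = link.lower()
--         for pattern in patterns_normalized:
--             if pattern in link_lower:
--                 matched.append(link)
--                 break
--     return matched
-- ===== SOURCE B (Python) =====
-- from typing import Iterable, List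
--
-- def match_link_patterns(links: Iterable[str], patterns: Iterable[str]) -> List[str]:
--     """Match configured patterns as case-insensitive substrings of URLs.
--
--     Inverted loops: scan per PATTERN over the still-unmatched links, moving
--     matched indices out of the candidate pool, and restore original order at
--     the end by sorting the collected indices.
--     """
--     links = list(links)
--     lows = [l.lower() for l in links]
--     remaining = list(range(len(links)))
--     matched_idx: List[int] = []
--     add_match = matched_idx.append
--     for p in patterns:
--         if not p:
--             continue
--         q = p.lower()
--         still: List[int] = []
--         keep = still.append
--         for i in remaining:
--             if q in lows[i]:
--                 add_match(i)
--             else: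
--                 keep(i)
--         remaining = still
--     return [links[i] for i in sorted(matched_idx)]
-- ===== Notes on version B (the rewrite author's own statement) =====
-- stated objective: alternative
-- what changed: A loops link-outer, testing every pattern inside each link with an early break; B inverts the loops: it scans per pattern over a shrinking pool of still-unmatched link indices, collects matched indices across rounds, and restores the original order by sorting the indices at the end.
import Mathlib
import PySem

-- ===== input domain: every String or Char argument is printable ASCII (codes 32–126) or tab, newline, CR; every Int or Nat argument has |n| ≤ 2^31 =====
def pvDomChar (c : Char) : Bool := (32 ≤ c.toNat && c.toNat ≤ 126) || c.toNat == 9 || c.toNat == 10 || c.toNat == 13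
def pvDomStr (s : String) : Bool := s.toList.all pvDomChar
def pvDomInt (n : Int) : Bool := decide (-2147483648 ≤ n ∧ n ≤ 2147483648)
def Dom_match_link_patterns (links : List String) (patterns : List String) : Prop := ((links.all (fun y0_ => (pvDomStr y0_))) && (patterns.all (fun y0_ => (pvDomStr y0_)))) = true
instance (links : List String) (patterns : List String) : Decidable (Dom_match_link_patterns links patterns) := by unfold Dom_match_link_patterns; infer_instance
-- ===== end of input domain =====

-- B inverts A's loops (pattern-outer over a shrinking pool of unmatched link indices,
-- original order restored by sorting the matched indices); alternative algorithm, same cost.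


-- ===== PORT A =====
def match_link_patterns (links : List String) (patterns : List String) : List String :=
  let patternsNormalized := (patterns.filter (fun p => !p.toList.isEmpty)).map PySem.Str.lower
  links.foldl (fun matched link =>
    let linkLower := PySem.Str.lower link
    -- inner 'for pattern … if pattern in link_lower: append; break' = append once on first hit
    if patternsNormalized.any (fun pattern => PySem.Chars.isIn pattern.toList linkLower.toList)
    then matched ++ [link] else matched) []

-- ===== PORT B =====
-- one round of B's outer loop: 'if not p: continue', then partition 'remaining' by 'q in lows[i]'
def altStep (lows : List (List Char)) (state : List Nat × List Nat) (p : String) : List Nat × List Nat :=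
  if p.toList.isEmpty then state
  else
    let q := PySem.Chars.lower p.toList
    state.2.foldl (fun s i =>
      if PySem.Chars.isIn q (lows.getD i []) then (s.1 ++ [i], s.2) else (s.1, s.2 ++ [i]))
      (state.1, [])

def match_link_patterns_alt (links : List String) (patterns : List String) : List String :=
  let lows := links.map (fun l => PySem.Chars.lower l.toList)
  let final := patterns.foldl (altStep lows) ([], List.range links.length)
  (PySem.List.sorted final.1 (fun i => i)).map (fun i => links.getD i "")

-- ===== PRECONDITION & SPEC =====
def Spec_match_link_patterns (links : List String) (patterns : List String) (out : List String) : Prop := out = match_link_patterns_alt links patterns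
instance (links : List String) (patterns : List String) (out : List String) : Decidable (Spec_match_link_patterns links patterns out) := by unfold Spec_match_link_patterns; infer_instance

-- ===== CLAIM (what is proved, stated in full; the proofs are below) =====
def Claim_equal_match_link_patterns : Prop := ∀ (links : List String) (patterns : List String), Dom_match_link_patterns links patterns → Spec_match_link_patterns links patterns (match_link_patterns links patterns)

-- ===== LEMMAS AND PROOFS =====

-- does some (normalized) pattern of ps match index i?
def predAny (lows : List (List Char)) (ps : List String) (i : Nat) : Bool :=
  ps.any (fun p => !p.toList.isEmpty && PySem.Chars.isIn (PySem.Chars.lower p.toList) (lows.getD i []))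

lemma partition_fold (test : Nat → Bool) (rem mi still : List Nat) :
    rem.foldl (fun s i => if test i then (s.1 ++ [i], s.2) else (s.1, s.2 ++ [i])) (mi, still)
    = (mi ++ rem.filter test, still ++ rem.filter (fun i => !test i)) := by
  induction rem generalizing mi still with
  | nil => simp
  | cons x t ih =>
    by_cases h : test x <;> simp [List.foldl_cons, h, ih]

lemma perm_filter_or (p q : Nat → Bool) (r : List Nat) :
    (r.filter p ++ r.filter (fun i => q i && !p i)).Perm (r.filter (fun i => p i || q i)) := by
  induction r with
  | nil => simp
  | cons x t ih =>
    by_cases hp : p x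
    · simpa [List.filter_cons, hp] using ih.cons x
    · by_cases hq : q x
      · simp only [List.filter_cons, hp, hq]
        exact (List.perm_middle.trans (ih.cons x))
      · simpa [List.filter_cons, hp, hq] using ih

lemma outer_fold (lows : List (List Char)) (ps : List String) (m r : List Nat) :
    (ps.foldl (altStep lows) (m, r)).1.Perm (m ++ r.filter (predAny lows ps)) ∧
    (ps.foldl (altStep lows) (m, r)).2 = r.filter (fun i => !predAny lows ps i) := by
  induction ps generalizing m r with
  | nil =>
    have h0 : ∀ i, predAny lows [] i = false := fun i => by simp [predAny]
    refine ⟨?_, ?_⟩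
    · rw [List.foldl_nil, List.filter_congr fun i _ => h0 i, List.filter_false, List.append_nil]
    · rw [List.foldl_nil, List.filter_congr fun i _ => (by rw [h0 i]; rfl : (!predAny lows [] i) = true),
        List.filter_true]
  | cons p t ih =>
    rw [List.foldl_cons]
    by_cases h : p.toList.isEmpty
    · have hpred : ∀ i, predAny lows (p :: t) i = predAny lows t i := by
        intro i; simp [predAny, h]
      rw [show altStep lows (m, r) p = (m, r) from by simp [altStep, h]]
      refine ⟨(ih m r).1.trans ?_, ?_⟩
      · rw [List.filter_congr fun i _ => hpred i]
      · rw [(ih m r).2]; exact List.filter_congr fun i _ => by rw [hpred i]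
    · set test : Nat → Bool := fun i => PySem.Chars.isIn (PySem.Chars.lower p.toList) (lows.getD i []) with htest
      have hpred : ∀ i, predAny lows (p :: t) i = (test i || predAny lows t i) := by
        intro i; simp [predAny, h, htest]
      have hstep : altStep lows (m, r) p = (m ++ r.filter test, r.filter (fun i => !test i)) := by
        unfold altStep
        rw [if_neg (by simp [h])]
        rw [partition_fold test r m []]
        rw [List.nil_append]
      rw [hstep]
      obtain ⟨ih1, ih2⟩ := ih (m ++ r.filter test) (r.filter (fun i => !test i))
      refine ⟨ih1.trans ?_, ?_⟩
      · rw [List.append_assoc, List.filter_filter]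
        refine List.Perm.append_left m ?_
        rw [List.filter_congr fun i _ => hpred i]
        exact perm_filter_or test (predAny lows t) r
      · rw [ih2, List.filter_filter]
        exact List.filter_congr fun i _ => by rw [hpred i]; cases test i <;> cases predAny lows t i <;> rfl

lemma idx_filter_map {α : Type} (xs : List α) (d : α) (f : α → Bool) :
    ((List.range xs.length).filter (fun i => f (xs.getD i d))).map (fun i => xs.getD i d)
      = xs.filter f := by
  induction xs with
  | nil => simp
  | cons x t ih =>
    have hmap : (List.map Nat.succ (List.range t.length)).filter (fun i => f ((x :: t).getD i d))
        = List.map Nat.succ ((List.range t.length).filter (fun i => f (t.getD i d))) := by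
      rw [List.filter_map]; rfl
    have hcomp : ((fun i => (x :: t).getD i d) ∘ Nat.succ) = (fun i => t.getD i d) := rfl
    rw [List.length_cons, List.range_succ_eq_map, List.filter_cons, List.getD_cons_zero]
    by_cases hf : f x
    · rw [if_pos hf, List.map_cons, hmap, List.map_map, hcomp, ih, List.filter_cons, if_pos hf]
      rfl
    · rw [if_neg hf, hmap, List.map_map, hcomp, ih, List.filter_cons, if_neg hf]

lemma ports_eq (links patterns : List String) :
    match_link_patterns links patterns = match_link_patterns_alt links patterns := by
  unfold match_link_patterns match_link_patterns_alt
  rw [PySem.List.foldl_append_if_eq_filter]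
  simp only [List.nil_append]
  set lows := links.map (fun l => PySem.Chars.lower l.toList) with hlows
  have houter := outer_fold lows patterns [] (List.range links.length)
  have hsorted : PySem.List.sorted (patterns.foldl (altStep lows) ([], List.range links.length)).1 (fun i => i)
      = (List.range links.length).filter (predAny lows patterns) := by
    refine PySem.List.sorted_eq_of_perm_of_pairwise_lt _ _ _ ?_ ?_
    · exact (houter.1.trans (by simp)).symm
    · exact List.pairwise_lt_range.filter _
  rw [hsorted]
  have hgetD : ∀ i : Nat, lows[i]?.getD [] = PySem.Chars.lower ((links[i]?.getD "").toList) := by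
    intro i
    rw [hlows, List.getElem?_map]
    cases links[i]? <;> rfl
  have hpred : ∀ i, predAny lows patterns i
      = ((patterns.filter (fun p => !p.toList.isEmpty)).map PySem.Str.lower).any
          (fun pat => PySem.Chars.isIn pat.toList (PySem.Str.lower (links.getD i "")).toList) := by
    intro i
    simp [predAny, hgetD, List.any_map, List.any_filter, Function.comp]
  rw [List.filter_congr fun i _ => hpred i]
  exact (idx_filter_map links ""
    (fun link => ((patterns.filter (fun p => !p.toList.isEmpty)).map PySem.Str.lower).any
      (fun pat => PySem.Chars.isIn pat.toList (PySem.Str.lower link).toList))).symm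

-- ===== VERDICT (by name: the statement is the Claim_ definition above) =====
theorem match_link_patterns_spec : Claim_equal_match_link_patterns := by
  intro links patterns _
  unfold Spec_match_link_patterns
  exact ports_eq links patterns
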